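-- pv_equiv track=rewrite | github.com/peterkim1994/UFC-outcome-classifier | data_preprocessor.py | encode_age
-- ===== SOURCE A (Python) =====
-- def encode_age(dobs):
--     encoded_ages =[]
--     for dob in dobs:
--         age = 2020-dob
--         if age <= 25:
--             encoded_ages.append([1])
--         elif age <=34:
--             encoded_ages.append([2])
--         elif age <=39:
--             encoded_ages.append([3])
--         else:
--             encoded_ages.append([4])
--     return encoded_ages
-- ===== SOURCE B (Python) =====
-- def encode_age(dobs):
--     # Threshold-major algorithm: start every fighter at category 1, then make
--     # one full pass over the data per birth-year bound, bumping the counter of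
--     # everyone born on or before that bound. dob <= 1994 <=> age >= 26, etc.
--     cats = [1] * len(dobs)
--     for bound in (1994, 1985, 1980):
--         for i, dob in enumerate(dobs):
--             if dob <= bound:
--                 cats[i] += 1
--     return [[c] for c in cats]
-- ===== Notes on version B (the rewrite author's own statement) =====
-- stated objective: alternative
-- what changed: Swaps the loop nest: instead of classifying each age with a per-element comparison ladder, B initialises every category to 1 and makes one pass over the data per birth-year threshold, incrementing a counter array, then wraps the counters.
import Mathlib
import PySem

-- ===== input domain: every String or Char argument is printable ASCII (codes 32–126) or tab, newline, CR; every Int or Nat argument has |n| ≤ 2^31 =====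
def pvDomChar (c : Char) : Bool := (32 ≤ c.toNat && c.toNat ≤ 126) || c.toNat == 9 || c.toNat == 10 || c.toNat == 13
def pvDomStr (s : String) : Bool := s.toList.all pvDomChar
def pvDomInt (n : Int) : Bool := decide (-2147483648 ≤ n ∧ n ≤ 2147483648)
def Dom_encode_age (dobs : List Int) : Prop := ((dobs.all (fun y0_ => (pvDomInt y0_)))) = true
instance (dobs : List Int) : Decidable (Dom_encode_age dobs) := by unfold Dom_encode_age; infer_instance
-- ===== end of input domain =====

-- B swaps the loop nest: one counter-increment pass per birth-year threshold instead of a per-element comparison ladder (alternative, same cost).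


-- ===== PORT A =====
def encode_age (dobs : List Int) : List (List Int) :=
  dobs.foldl (fun encoded_ages dob =>
    let age : Int := 2020 - dob
    if age ≤ 25 then encoded_ages ++ [[1]]
    else if age ≤ 34 then encoded_ages ++ [[2]]
    else if age ≤ 39 then encoded_ages ++ [[3]]
    else encoded_ages ++ [[4]]) []

-- ===== PORT B =====
-- one inner pass: 'for i, dob in enumerate(dobs): if dob <= bound: cats[i] += 1'
def pvPass (bound : Int) (cats dobs : List Int) : List Int :=
  List.zipWith (fun c dob => if dob ≤ bound then c + 1 else c) cats dobs

def encode_age_alt (dobs : List Int) : List (List Int) :=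
  let cats0 := dobs.map (fun _ => (1 : Int))
  let cats := [(1994 : Int), 1985, 1980].foldl (fun cats bound => pvPass bound cats dobs) cats0
  cats.map (fun c => [c])

-- ===== PRECONDITION & SPEC =====
def Spec_encode_age (dobs : List Int) (out : List (List Int)) : Prop := out = encode_age_alt dobs
instance (dobs : List Int) (out : List (List Int)) : Decidable (Spec_encode_age dobs out) := by unfold Spec_encode_age; infer_instance

-- ===== CLAIM (what is proved, stated in full; the proofs are below) =====
def Claim_equal_encode_age : Prop := ∀ (dobs : List Int), Dom_encode_age dobs → Spec_encode_age dobs (encode_age dobs)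

-- ===== LEMMAS AND PROOFS =====

lemma A_foldl_eq (dobs : List Int) (a : List (List Int)) :
    dobs.foldl (fun encoded_ages dob =>
      let age : Int := 2020 - dob
      if age ≤ 25 then encoded_ages ++ [[1]]
      else if age ≤ 34 then encoded_ages ++ [[2]]
      else if age ≤ 39 then encoded_ages ++ [[3]]
      else encoded_ages ++ [[4]]) a
    = a ++ dobs.map (fun dob =>
        if 2020 - dob ≤ 25 then [1]
        else if 2020 - dob ≤ 34 then [2]
        else if 2020 - dob ≤ 39 then [3] else [4]) := by
  induction dobs generalizing a with
  | nil => simp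
  | cons d ds ih =>
    rw [List.foldl_cons, ih]
    simp only [List.map_cons]
    split_ifs <;> simp

lemma alt_cons (d : Int) (ds : List Int) :
    encode_age_alt (d :: ds)
      = [(if d ≤ 1980 then (if d ≤ 1985 then (if d ≤ 1994 then (1:Int) + 1 else 1) + 1
            else (if d ≤ 1994 then (1:Int) + 1 else 1)) + 1
          else (if d ≤ 1985 then (if d ≤ 1994 then (1:Int) + 1 else 1) + 1
            else (if d ≤ 1994 then (1:Int) + 1 else 1)))] :: encode_age_alt ds := by
  simp only [encode_age_alt, pvPass, List.foldl, List.map, List.zipWith]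

-- ===== VERDICT (by name: the statement is the Claim_ definition above) =====
theorem encode_age_spec : Claim_equal_encode_age := by
  intro dobs _
  unfold Spec_encode_age
  show encode_age dobs = encode_age_alt dobs
  induction dobs with
  | nil => rfl
  | cons d ds ih =>
    have hds : Dom_encode_age ds := by simp_all [Dom_encode_age]
    rw [alt_cons, ← ih hds]
    unfold encode_age
    rw [List.foldl_cons, A_foldl_eq, A_foldl_eq]
    simp only [List.nil_append]
    congr 1
    split_ifs <;> (first | rfl | omega | simp_all | norm_num) <;> omega
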